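-- pv_equiv track=rewrite | github.com/Komdix/bekap_wins | programko laptop/11/p6_template copy.py | split_template
-- ===== SOURCE A (Python) =====
-- def split_template(template: str) -> list[str]:
--     parts = []
--     temp = ''
--     inside_brackets = False
--     for char in template:
--         if char == '[':
--             if temp:
--                 parts.append(temp)
--             temp = '['
--             inside_brackets = True
--         elif char == ']':
--             temp += ']'
--             parts.append(temp)
--             temp = ''
--             inside_brackets = False
--         else:
--             temp += char
--             if not inside_brackets and temp != '[':
--                 parts.append(temp)
--                 temp = ''
--     if temp:
--         parts.append(temp)
--     return parts
-- ===== SOURCE B (Python) =====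
-- import re
-- def split_template(template):
--     return re.findall(r'\[[^\[\]]*\]?|[\s\S]', template)
-- ===== Notes on version B (the rewrite author's own statement) =====
-- stated objective: idiomatic
-- what changed: Replaced the char-by-char state machine (temp buffer + inside_brackets flag) with a one-line regex tokenizer re.findall(r'\[[^\[\]]*\]?|[\s\S]', template).
import Mathlib
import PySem

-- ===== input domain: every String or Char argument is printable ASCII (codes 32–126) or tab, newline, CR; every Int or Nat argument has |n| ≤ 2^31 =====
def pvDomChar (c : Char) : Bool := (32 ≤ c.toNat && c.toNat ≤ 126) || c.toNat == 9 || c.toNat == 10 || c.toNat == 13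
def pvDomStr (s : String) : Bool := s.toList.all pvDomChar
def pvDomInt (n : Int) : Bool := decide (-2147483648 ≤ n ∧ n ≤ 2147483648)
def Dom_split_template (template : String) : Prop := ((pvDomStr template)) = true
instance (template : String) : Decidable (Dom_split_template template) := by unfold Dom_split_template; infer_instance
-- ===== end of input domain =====

-- B replaces A's char-by-char state machine with a single regex tokenizer (same output, same cost).

-- ===== PORT A =====
-- state: (parts, temp, inside_brackets); temp kept as List Char, joined to String at the end
def splitStepA (st : List (List Char) × List Char × Bool) (c : Char) :
    List (List Char) × List Char × Bool :=
  let (parts, temp, inside) := st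
  if c = '[' then
    ((if temp ≠ [] then parts ++ [temp] else parts), ['['], true)
  else if c = ']' then
    (parts ++ [temp ++ [']']], [], false)
  else
    let t := temp ++ [c]
    if ¬ inside ∧ t ≠ ['['] then (parts ++ [t], [], inside) else (parts, t, inside)

def split_template (template : String) : List String :=
  let (parts, temp, _) := template.toList.foldl splitStepA ([], [], false)
  (if temp ≠ [] then parts ++ [temp] else parts).map (fun l => String.ofList l)

-- ===== PORT B =====
-- hand port of re.findall(r'\[[^\[\]]*\]?|[\s\S]', template): at '[' take the maximal
-- run of non-bracket chars then an optional ']'; any other char is its own token.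
-- exact: the regex alternatives correspond one-to-one to the branches below.
def splitNonBracket (d : Char) : Bool := d ≠ '[' ∧ d ≠ ']'

def splitTokB : List Char → List (List Char)
  | [] => []
  | c :: rest =>
    if c = '[' then
      let run := rest.takeWhile splitNonBracket
      let rest' := rest.dropWhile splitNonBracket
      if rest'.head? = some ']' then ('[' :: run ++ [']']) :: splitTokB rest'.tail
      else ('[' :: run) :: splitTokB rest'
    else [c] :: splitTokB rest
termination_by l => l.length
decreasing_by
  · have h2 := List.length_dropWhile_le splitNonBracket rest
    have h3 : (List.dropWhile splitNonBracket rest).tail.length ≤ (List.dropWhile splitNonBracket rest).length := by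
      simp [List.length_tail]
    simp at h2 ⊢; simp at h3; omega
  · have h2 := List.length_dropWhile_le splitNonBracket rest
    simp at h2 ⊢; omega
  · simp

def split_template_alt (template : String) : List String :=
  (splitTokB template.toList).map (fun l => String.ofList l)

-- ===== PRECONDITION & SPEC =====
def Spec_split_template (template : String) (out : List String) : Prop := out = split_template_alt template
instance (template : String) (out : List String) : Decidable (Spec_split_template template out) := by unfold Spec_split_template; infer_instance

-- ===== CLAIM (what is proved, stated in full; the proofs are below) =====
def Claim_equal_split_template : Prop := ∀ (template : String), Dom_split_template template → Spec_split_template template (split_template template)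

-- ===== LEMMAS AND PROOFS =====

-- finishing step of port A, abstracted
def splitFinish (st : List (List Char) × List Char × Bool) : List (List Char) :=
  if st.2.1 ≠ [] then st.1 ++ [st.2.1] else st.1

-- the combined invariant: from a fresh state, and from an inside-brackets state
-- whose buffer is '[' :: m with m bracket-free, A's fold computes B's tokens.
theorem splitNB_append (m l : List Char) (hm : ∀ d ∈ m, splitNonBracket d = true) :
    (m ++ l).takeWhile splitNonBracket = m ++ l.takeWhile splitNonBracket ∧
    (m ++ l).dropWhile splitNonBracket = l.dropWhile splitNonBracket := by
  induction m with
  | nil => simp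
  | cons a m ih =>
    have ha := hm a (by simp)
    have := ih (fun d hd => hm d (by simp [hd]))
    simp [ha, this.1, this.2]

theorem splitTokB_nil : splitTokB [] = [] := by simp [splitTokB]

theorem splitTokB_other (c : Char) (hc : c ≠ '[') (l : List Char) :
    splitTokB (c :: l) = [c] :: splitTokB l := by
  rw [splitTokB]; simp [hc]

theorem splitTokB_open_close (m r2 : List Char) (hm : ∀ d ∈ m, splitNonBracket d = true) :
    splitTokB ('[' :: (m ++ ']' :: r2)) = ('[' :: m ++ [']']) :: splitTokB r2 := by
  have h := splitNB_append m (']' :: r2) hm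
  have ht : List.takeWhile splitNonBracket (']' :: r2) = [] :=
    List.takeWhile_cons_of_neg (by decide)
  have hd : List.dropWhile splitNonBracket (']' :: r2) = ']' :: r2 :=
    List.dropWhile_cons_of_neg (by decide)
  rw [splitTokB]
  simp [h.1, h.2, ht, hd]

theorem splitTokB_open_open (m r2 : List Char) (hm : ∀ d ∈ m, splitNonBracket d = true) :
    splitTokB ('[' :: (m ++ '[' :: r2)) = ('[' :: m) :: splitTokB ('[' :: r2) := by
  have h := splitNB_append m ('[' :: r2) hm
  have ht : List.takeWhile splitNonBracket ('[' :: r2) = [] :=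
    List.takeWhile_cons_of_neg (by decide)
  have hd : List.dropWhile splitNonBracket ('[' :: r2) = '[' :: r2 :=
    List.dropWhile_cons_of_neg (by decide)
  rw [splitTokB]
  simp [h.1, h.2, ht, hd]

theorem splitTokB_open_end (m : List Char) (hm : ∀ d ∈ m, splitNonBracket d = true) :
    splitTokB ('[' :: m) = [('[' :: m)] := by
  have h := splitNB_append m [] hm
  simp only [List.append_nil] at h
  rw [splitTokB]
  simp [h.1, h.2, splitTokB_nil]

theorem split_main (n : Nat) : ∀ l : List Char, l.length ≤ n →
    (∀ parts, splitFinish (l.foldl splitStepA (parts, [], false)) = parts ++ splitTokB l) ∧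
    (∀ parts m, (∀ d ∈ m, splitNonBracket d = true) →
      splitFinish (l.foldl splitStepA (parts, '[' :: m, true)) = parts ++ splitTokB ('[' :: (m ++ l))) := by
  induction n with
  | zero =>
    intro l hl
    have hl0 : l = [] := List.length_eq_zero_iff.mp (Nat.le_zero.mp hl)
    subst hl0
    constructor
    · intro parts; simp [splitFinish, splitTokB_nil]
    · intro parts m hm
      simp [splitFinish, splitTokB_open_end m hm]
  | succ n ih =>
    intro l hl
    constructor
    · intro parts
      match l with
      | [] => simp [splitFinish, splitTokB_nil]
      | c :: rest =>
        have hr : rest.length ≤ n := by simpa using hl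
        rw [List.foldl_cons]
        by_cases hc : c = '['
        · subst hc
          have hstep : splitStepA (parts, [], false) '[' = (parts, ['['], true) := by
            simp [splitStepA]
          rw [hstep]
          simpa using (ih rest hr).2 parts [] (by simp)
        · by_cases hc2 : c = ']'
          · subst hc2
            have hstep : splitStepA (parts, [], false) ']' = (parts ++ [[']']], [], false) := by
              simp [splitStepA]
            rw [hstep, (ih rest hr).1 (parts ++ [[']']]), splitTokB_other ']' hc rest]
            simp
          · have hstep : splitStepA (parts, [], false) c = (parts ++ [[c]], [], false) := by
              simp [splitStepA, hc, hc2]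
            rw [hstep, (ih rest hr).1 (parts ++ [[c]]), splitTokB_other c hc rest]
            simp
    · intro parts m hm
      match l with
      | [] => simp [splitFinish, splitTokB_open_end m hm]
      | c :: rest =>
        have hr : rest.length ≤ n := by simpa using hl
        rw [List.foldl_cons]
        by_cases hc : c = '['
        · subst hc
          have hstep : splitStepA (parts, '[' :: m, true) '[' = (parts ++ ['[' :: m], ['['], true) := by
            simp [splitStepA]
          rw [hstep, splitTokB_open_open m rest hm]
          have h2 := (ih rest hr).2 (parts ++ ['[' :: m]) [] (by simp)
          simp only [List.nil_append] at h2
          rw [h2]; simp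
        · by_cases hc2 : c = ']'
          · subst hc2
            have hstep : splitStepA (parts, '[' :: m, true) ']' = (parts ++ ['[' :: m ++ [']']], [], false) := by
              simp [splitStepA]
            rw [hstep, (ih rest hr).1 (parts ++ ['[' :: m ++ [']']]), splitTokB_open_close m rest hm]
            simp
          · have hm' : ∀ d ∈ m ++ [c], splitNonBracket d = true := by
              intro d hd
              rcases List.mem_append.mp hd with h | h
              · exact hm d h
              · simp at h; subst h; simp [splitNonBracket, hc, hc2]
            have hstep : splitStepA (parts, '[' :: m, true) c = (parts, '[' :: (m ++ [c]), true) := by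
              simp [splitStepA, hc, hc2]
            rw [hstep, (ih rest hr).2 parts (m ++ [c]) hm']
            have : (m ++ [c]) ++ rest = m ++ (c :: rest) := by simp
            rw [this]

theorem split_template_spec : Claim_equal_split_template := by
  intro t _
  unfold Spec_split_template split_template split_template_alt
  have h := (split_main t.toList.length t.toList le_rfl).1 []
  simp only [splitFinish] at h
  rcases hst : t.toList.foldl splitStepA ([], [], false) with ⟨p, tmp, b⟩
  rw [hst] at h
  simp only at h ⊢
  rw [h]
  simp
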